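-- pv_equiv track=rewrite | github.com/rousong19/ass1 | ass1.py | is_five_repeated
-- ===== SOURCE A (Python) =====
-- def is_five_repeated(input, dict):
--     not_repeated_list = []
--     for key,value in dict.items():
--         value = str(value)
--         if value[0] == '5':
--             not_repeated_list.append(key)
--
--     for e in input:
--         if e in not_repeated_list and input.count(e)>1:
--             return True
--     return False
-- ===== SOURCE B (Python) =====
-- def is_five_repeated(input, dict):
--     counts = {}
--     for e in input:
--         counts[e] = counts.get(e, 0) + 1
--     for k, v in dict.items():
--         if str(v)[0] == '5' and counts.get(k, 0) > 1:
--             return True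
--     return False
-- ===== Notes on version B (the rewrite author's own statement) =====
-- stated objective: alternative
-- what changed: B builds a multiplicity table of the input in one pass and then scans the dict entries directly, so A's intermediate qualifying-key list, per-element membership test and repeated input.count rescans disappear.
import Mathlib
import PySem

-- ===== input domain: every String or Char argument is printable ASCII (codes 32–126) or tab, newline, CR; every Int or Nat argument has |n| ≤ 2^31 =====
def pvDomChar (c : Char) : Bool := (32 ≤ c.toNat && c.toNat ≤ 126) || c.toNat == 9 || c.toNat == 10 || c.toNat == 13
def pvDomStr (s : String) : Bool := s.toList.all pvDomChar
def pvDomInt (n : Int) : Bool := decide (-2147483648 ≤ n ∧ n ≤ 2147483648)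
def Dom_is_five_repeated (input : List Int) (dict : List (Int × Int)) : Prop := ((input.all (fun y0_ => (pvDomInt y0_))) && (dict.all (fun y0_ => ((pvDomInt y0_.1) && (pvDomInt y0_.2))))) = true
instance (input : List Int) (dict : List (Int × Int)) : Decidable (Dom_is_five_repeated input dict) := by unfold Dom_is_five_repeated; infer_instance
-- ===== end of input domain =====

-- B counts the input's elements once into a dictionary and then scans the dict entries directly,
-- replacing A's per-element membership test and repeated input.count rescans (objective: alternative decomposition, same result).

-- ===== PORT A =====
-- loop 'for e in input: if e in not_repeated_list and input.count(e) > 1: return True'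
-- (full = the whole input list, for .count)
def ifrLoopA (full : List Int) : List Int → List Int → Bool
  | [], _ => false
  | e :: rest, nrl =>
      if nrl.contains e && full.count e > 1 then true else ifrLoopA full rest nrl

def is_five_repeated (input : List Int) (dict : List (Int × Int)) : Bool :=
  -- 'for key,value in dict.items(): value = str(value); if value[0] == '5': not_repeated_list.append(key)'
  let not_repeated_list :=
    dict.foldl (fun acc kv =>
      if PySem.Str.pyGet? (PySem.Int.toStr kv.2) 0 == some '5' then acc ++ [kv.1] else acc) []
  ifrLoopA input input not_repeated_list

-- ===== PORT B =====
-- loop 'for k, v in dict.items(): if str(v)[0] == '5' and counts.get(k, 0) > 1: return True'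
def ifrScanDict (counts : PySem.Dict Int Int) : List (Int × Int) → Bool
  | [] => false
  | (k, v) :: rest =>
      if (PySem.Str.pyGet? (PySem.Int.toStr v) 0 == some '5') && counts.getD k 0 > 1 then true
      else ifrScanDict counts rest

def is_five_repeated_alt (input : List Int) (dict : List (Int × Int)) : Bool :=
  -- 'counts = {}; for e in input: counts[e] = counts.get(e, 0) + 1'
  let counts := input.foldl (fun d e => d.insert e (d.getD e 0 + 1)) PySem.Dict.empty
  ifrScanDict counts dict

-- ===== PRECONDITION & SPEC =====
def Spec_is_five_repeated (input : List Int) (dict : List (Int × Int)) (out : Bool) : Prop := out = is_five_repeated_alt input dict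
instance (input : List Int) (dict : List (Int × Int)) (out : Bool) : Decidable (Spec_is_five_repeated input dict out) := by unfold Spec_is_five_repeated; infer_instance

-- ===== CLAIM (what is proved, stated in full; the proofs are below) =====
def Claim_equal_is_five_repeated : Prop := ∀ (input : List Int) (dict : List (Int × Int)), Dom_is_five_repeated input dict → Spec_is_five_repeated input dict (is_five_repeated input dict)

-- ===== LEMMAS AND PROOFS =====

theorem ifrLoopA_eq_any (full rest nrl : List Int) :
    ifrLoopA full rest nrl = rest.any (fun e => nrl.contains e && full.count e > 1) := by
  induction rest with
  | nil => rfl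
  | cons e r ih => cases h : (nrl.contains e && full.count e > 1) <;> simp [ifrLoopA, h, ih]

theorem ifrScanDict_eq_any (counts : PySem.Dict Int Int) (l : List (Int × Int)) :
    ifrScanDict counts l =
      l.any (fun kv => (PySem.Str.pyGet? (PySem.Int.toStr kv.2) 0 == some '5')
        && counts.getD kv.1 0 > 1) := by
  induction l with
  | nil => rfl
  | cons kv r ih =>
      obtain ⟨k, v⟩ := kv
      cases h : ((PySem.Str.pyGet? (PySem.Int.toStr v) 0 == some '5')
          && PySem.Dict.getD counts k 0 > 1) <;> simp [ifrScanDict, h, ih, Bool.beq_eq_decide_eq]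

-- the counting loop is exactly collections.Counter: its lookup returns the list count
theorem ifr_counts_getD (input : List Int) (k : Int) :
    (input.foldl (fun d e => d.insert e (d.getD e 0 + 1)) PySem.Dict.empty).getD k 0
      = (input.count k : Int) := by
  suffices h : ∀ (xs : List Int) (d : PySem.Dict Int Int),
      (xs.foldl (fun d e => d.insert e (d.getD e 0 + 1)) d).getD k 0
        = d.getD k 0 + (xs.count k : Int) by
    simpa [PySem.Dict.getD_empty] using h input PySem.Dict.empty
  intro xs
  induction xs with
  | nil => simp
  | cons e r ih =>
      intro d
      rw [List.foldl_cons, ih, PySem.Dict.getD_insert, List.count_cons]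
      by_cases hk : k = e <;> simp [hk] <;> omega

-- ===== VERDICT (by name: the statement is the Claim_ definition above) =====
theorem is_five_repeated_spec : Claim_equal_is_five_repeated := by
  intro input dict _
  unfold Spec_is_five_repeated is_five_repeated is_five_repeated_alt
  rw [PySem.List.foldl_append_if, ifrLoopA_eq_any, ifrScanDict_eq_any]
  simp only [List.nil_append, ifr_counts_getD]
  rw [Bool.eq_iff_iff]
  simp only [List.any_eq_true, Bool.and_eq_true, List.contains_eq_mem, decide_eq_true_eq,
    List.mem_map, List.mem_filter, gt_iff_lt, Nat.one_lt_cast, beq_iff_eq]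
  constructor
  · rintro ⟨e, he, ⟨kv, ⟨hkv, hq⟩, hk⟩, hc⟩
    exact ⟨kv, hkv, hq, hk ▸ hc⟩
  · rintro ⟨kv, hkv, hq, hc⟩
    have hmem : kv.1 ∈ input := List.count_pos_iff.mp (by omega)
    exact ⟨kv.1, hmem, ⟨kv, ⟨hkv, hq⟩, rfl⟩, hc⟩
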